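-- pv_equiv track=rewrite | github.com/mouredev/roadmap-retos-programacion | Roadmap/04 - CADENAS DE CARACTERES/python/Chrisdev00.py | is_Isograma
-- ===== SOURCE A (Python) =====
-- def is_Isograma (word):
--
--     palabra = word.lower()
--     caracteres_filtrados = []
--
--     for caracter in palabra:
--         if caracter.isalpha():
--             caracteres_filtrados.append(caracter)
--
--     palabra = ''.join(caracteres_filtrados)
--     return len(palabra) == len(set(palabra))
-- ===== SOURCE B (Python) =====
-- def is_Isograma(word):
--     letters = sorted(c for c in word.lower() if c.isalpha())
--     for a, b in zip(letters, letters[1:]):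
--         if a == b:
--             return False
--     return True
-- ===== Notes on version B (the rewrite author's own statement) =====
-- stated objective: alternative
-- what changed: replaces the append-loop plus set-cardinality comparison (len(word)==len(set(word))) with sorting the filtered letters and scanning consecutive pairs for an equal adjacent pair
import Mathlib
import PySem

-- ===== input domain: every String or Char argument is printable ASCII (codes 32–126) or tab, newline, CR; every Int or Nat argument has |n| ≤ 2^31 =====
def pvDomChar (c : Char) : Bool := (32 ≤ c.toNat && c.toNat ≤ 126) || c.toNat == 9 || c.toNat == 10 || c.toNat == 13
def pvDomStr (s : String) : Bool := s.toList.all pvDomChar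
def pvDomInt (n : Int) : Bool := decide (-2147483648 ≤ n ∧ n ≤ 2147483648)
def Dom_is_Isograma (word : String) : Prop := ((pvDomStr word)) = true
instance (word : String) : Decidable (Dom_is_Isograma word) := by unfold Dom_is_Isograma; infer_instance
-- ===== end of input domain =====

-- B sorts the filtered letters and scans adjacent pairs instead of A's set-cardinality comparison (alternative decomposition, not faster).

-- ===== PORT A =====
def is_Isograma (word : String) : Bool :=
  let palabra := PySem.Chars.lower word.toList
  let filtrados := palabra.foldl (fun acc c => if PySem.Chars.isalpha c then acc ++ [c] else acc) ([] : List Char)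
  decide (PySem.Chars.len filtrados = PySem.Set.len (PySem.Set.ofList filtrados))

-- ===== PORT B =====
-- the 'for a, b in zip(letters, letters[1:])' adjacent scan
def noAdjDup : List Char → Bool
  | [] => true
  | [_] => true
  | a :: b :: t => if a == b then false else noAdjDup (b :: t)

def is_Isograma_alt (word : String) : Bool :=
  let letters := PySem.List.sorted ((PySem.Chars.lower word.toList).filter PySem.Chars.isalpha) (fun c => c) false
  noAdjDup letters

-- ===== PRECONDITION & SPEC =====
def Spec_is_Isograma (word : String) (out : Bool) : Prop := out = is_Isograma_alt word
instance (word : String) (out : Bool) : Decidable (Spec_is_Isograma word out) := by unfold Spec_is_Isograma; infer_instance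

-- ===== CLAIM (what is proved, stated in full; the proofs are below) =====
def Claim_equal_is_Isograma : Prop := ∀ (word : String), Dom_is_Isograma word → Spec_is_Isograma word (is_Isograma word)

-- ===== LEMMAS AND PROOFS =====

-- A's test: set(l) has as many elements as l exactly when l has no duplicates
theorem ofList_length_lt_of_not_nodup (l : List Char) (h : ¬ l.Nodup) :
    (PySem.Set.ofList l).length < l.length := by
  induction l with
  | nil => simp at h
  | cons x xs ih =>
    rw [PySem.Set.ofList_cons]
    simp only [List.nodup_cons, not_and_or, not_not] at h
    have hle : (PySem.Set.ofList xs).length ≤ xs.length := PySem.Set.length_ofList_le xs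
    have hdle : (PySem.Set.discard (PySem.Set.ofList xs) x).length ≤ (PySem.Set.ofList xs).length := by
      simpa [PySem.Set.discard] using List.length_filter_le _ (PySem.Set.ofList xs)
    rcases h with hmem | hnd
    · have hx : x ∈ PySem.Set.ofList xs := (PySem.Set.mem_ofList xs x).2 hmem
      have hlt : (PySem.Set.discard (PySem.Set.ofList xs) x).length < (PySem.Set.ofList xs).length := by
        simp only [PySem.Set.discard]
        exact List.length_filter_lt_length_iff_exists.2 ⟨x, hx, by simp⟩
      simp only [List.length_cons]
      omega
    · have := ih hnd
      simp only [List.length_cons]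
      omega

theorem setlen_eq_iff (l : List Char) :
    ((PySem.Set.ofList l).length = l.length) ↔ l.Nodup := by
  constructor
  · intro h
    by_contra hnd
    exact absurd h (Nat.ne_of_lt (ofList_length_lt_of_not_nodup l hnd))
  · intro h; rw [PySem.Set.ofList_eq_self_of_nodup _ h]

-- B's scan: on a ≤-sorted list, no equal adjacent pair means no duplicates at all
theorem noAdjDup_iff_nodup : ∀ (l : List Char), l.Pairwise (· ≤ ·) →
    (noAdjDup l = true ↔ l.Nodup) := by
  intro l
  induction l with
  | nil => simp [noAdjDup]
  | cons a t ih =>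
    intro hp
    cases t with
    | nil => simp [noAdjDup]
    | cons b t' =>
      have hp' : (b :: t').Pairwise (· ≤ ·) := hp.tail
      have hab : a ≤ b := (List.pairwise_cons.1 hp).1 b (by simp)
      rw [show noAdjDup (a :: b :: t') = if a == b then false else noAdjDup (b :: t') from rfl]
      by_cases heq : a = b
      · subst heq; simp
      · simp only [beq_iff_eq, heq, if_false]
        rw [ih hp']
        constructor
        · intro hnd
          refine List.nodup_cons.2 ⟨?_, hnd⟩
          intro hmem
          rcases List.mem_cons.1 hmem with h | h
          · exact heq h
          · have hba : b ≤ a := (List.pairwise_cons.1 hp').1 a h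
            exact heq (le_antisymm hab hba)
        · intro hnd; exact hnd.of_cons

theorem is_Isograma_spec : Claim_equal_is_Isograma := by
  intro word _
  unfold Spec_is_Isograma is_Isograma is_Isograma_alt
  simp only [PySem.List.foldl_append_if_eq_filter, List.nil_append, PySem.Chars.len_eq,
    PySem.Set.len_eq]
  set l := (PySem.Chars.lower word.toList).filter PySem.Chars.isalpha with hl
  set s := PySem.List.sorted l (fun c => c) false with hs
  have hperm : s.Perm l := PySem.List.sorted_perm l (fun c => c) false
  have hpw : s.Pairwise (· ≤ ·) := by
    simpa using PySem.List.sorted_pairwise l (fun c => c)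
  have h1 : decide ((l.length : Int) = ((PySem.Set.ofList l).length : Int)) = decide l.Nodup := by
    rw [decide_eq_decide, Int.natCast_inj]
    exact ⟨fun h => (setlen_eq_iff l).1 h.symm, fun h => ((setlen_eq_iff l).2 h).symm⟩
  have h2 : noAdjDup s = decide l.Nodup := by
    by_cases hnd : l.Nodup
    · simp [hnd, (noAdjDup_iff_nodup s hpw).2 (hperm.nodup_iff.2 hnd)]
    · simp only [hnd, decide_false]
      by_contra h
      have : noAdjDup s = true := by
        cases hb : noAdjDup s
        · exact absurd hb h
        · rfl
      exact hnd (hperm.nodup_iff.1 ((noAdjDup_iff_nodup s hpw).1 this))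
  rw [h1, h2]

-- ===== VERDICT (by name: the statement is the Claim_ definition above) =====
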